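-- pv_equiv track=rewrite | github.com/swhan9404/swExpertAcademy | 0416수업/정식이의은행업무/sol2.py | triple
-- ===== SOURCE A (Python) =====
-- def to_int(code,n) :
--     result = 0
--     for i in range(len(code)) :
--         result+= code[i] * n ** (len(code) -1 -i)
--     return result
--
-- def triple(tri) :
--     tri_list = []
--     for i in range(len(tri)) :
--         origin = tri[i]
--         for j in range(3) :
--             if tri[i] != j :
--                 tri[i] = j
--                 tri_list.append(to_int(tri, 3))
--                 tri[i] = origin
--     return tri_list
-- ===== SOURCE B (Python) =====
-- def triple(tri):
--     n = len(tri)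
--     base = 0
--     for d in tri:
--         base = base * 3 + d
--     out = []
--     p = 3 ** (n - 1) if n else 0
--     for d in tri:
--         for j in range(3):
--             if d != j:
--                 out.append(base + (j - d) * p)
--         p //= 3
--     return out
-- ===== Notes on version B (the rewrite author's own statement) =====
-- stated objective: faster
-- what changed: Compute the base-3 value of the list once (Horner), then emit each variant as base + (j - d) * 3^(n-1-i) with a running power, instead of re-evaluating to_int over the whole list for every single-digit change.
import Mathlib
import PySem

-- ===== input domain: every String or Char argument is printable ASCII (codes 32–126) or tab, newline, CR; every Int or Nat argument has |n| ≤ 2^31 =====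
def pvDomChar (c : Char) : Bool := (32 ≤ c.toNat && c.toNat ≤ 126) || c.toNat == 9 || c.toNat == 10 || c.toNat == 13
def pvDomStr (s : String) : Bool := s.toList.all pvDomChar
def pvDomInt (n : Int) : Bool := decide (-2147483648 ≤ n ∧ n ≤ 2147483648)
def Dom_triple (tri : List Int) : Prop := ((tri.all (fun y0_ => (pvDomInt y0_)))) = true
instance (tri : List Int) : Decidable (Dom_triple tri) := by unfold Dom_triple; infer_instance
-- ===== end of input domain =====

-- B computes the base-3 value once (Horner) and emits each single-digit
-- variant by an incremental delta with a running power: O(n) instead of A's O(n^2).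


-- ===== PORT A =====
-- to_int(code, n): sum of code[i] * n^(len-1-i) over i in range(len(code)).
-- Indices produced by range(len(code)) are always in range, so getD is exact here.
def to_int (code : List Int) (n : Int) : Int :=
  (List.range code.length).foldl
    (fun result i => result + code.getD i 0 * n ^ (code.length - 1 - i)) 0

-- range(3) is the literal list [0, 1, 2]
def range3 : List Int := [0, 1, 2]

-- A mutates tri[i] to j, appends to_int, restores the original; net effect on tri is none,
-- so each inner evaluation sees tri.set i j and the outer state stays tri.
def triple (tri : List Int) : List Int :=
  (List.range tri.length).foldl
    (fun tri_list i =>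
      range3.foldl
        (fun acc j =>
          if tri.getD i 0 ≠ j then acc ++ [to_int (tri.set i j) 3]
          else acc)
        tri_list)
    []

-- ===== PORT B =====
-- inner loop body of Source B for one element d with current power p
-- range(3) on B's side
def range3B : List Int := [0, 1, 2]

def bInner (base d p : Int) : List Int :=
  range3B.foldl
    (fun acc j => if d ≠ j then acc ++ [base + (j - d) * p] else acc) []

-- the 'for d in tri' loop of Source B, carrying the running power p (p //= 3 each step)
def bLoop (l : List Int) (base p : Int) : List Int :=
  match l with
  | [] => []
  | d :: rest => bInner base d p ++ bLoop rest base (PySem.Int.floordiv p 3)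

def triple_alt (tri : List Int) : List Int :=
  let base := tri.foldl (fun b d => b * 3 + d) 0
  bLoop tri base (if tri.length = 0 then 0 else (3 : Int) ^ (tri.length - 1))

-- ===== PRECONDITION & SPEC =====
def Spec_triple (tri : List Int) (out : List Int) : Prop := out = triple_alt tri
instance (tri : List Int) (out : List Int) : Decidable (Spec_triple tri out) := by unfold Spec_triple; infer_instance

-- ===== CLAIM (what is proved, stated in full; the proofs are below) =====
def Claim_equal_triple : Prop := ∀ (tri : List Int), Dom_triple tri → Spec_triple tri (triple tri)

-- ===== LEMMAS AND PROOFS =====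

-- Horner value with accumulator
def H (l : List Int) (b : Int) : Int := l.foldl (fun b d => b * 3 + d) b

theorem H_cons (d : Int) (l : List Int) (b : Int) : H (d :: l) b = H l (b * 3 + d) := rfl

theorem H_acc (l : List Int) (b : Int) : H l b = b * 3 ^ l.length + H l 0 := by
  induction l generalizing b with
  | nil => simp [H]
  | cons d rest ih =>
    rw [H_cons, H_cons, ih, ih (0 * 3 + d)]
    simp [pow_succ]
    ring

-- the common shape both programs produce
def T (l : List Int) (base : Int) : List Int :=
  (List.range l.length).flatMap
    (fun i => (range3.filter (fun j => l.getD i 0 ≠ j)).map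
      (fun j => base + (j - l.getD i 0) * 3 ^ (l.length - 1 - i)))

theorem T_cons (d : Int) (rest : List Int) (base : Int) :
    T (d :: rest) base =
      (range3.filter (fun j => d ≠ j)).map
        (fun j => base + (j - d) * 3 ^ rest.length) ++ T rest base := by
  unfold T
  rw [show (d :: rest).length = rest.length + 1 from rfl,
      List.range_succ_eq_map, List.flatMap_cons, List.flatMap_map]
  congr 1
  congr 1
  funext i
  rw [show i.succ = i + 1 from rfl, List.getD_cons_succ,
      show rest.length + 1 - 1 - (i + 1) = rest.length - 1 - i from by omega]

-- key delta lemma: Horner value after a single-digit change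
theorem H_set (l : List Int) (i : Nat) (v : Int) (h : i < l.length) :
    H (l.set i v) 0 = H l 0 + (v - l.getD i 0) * 3 ^ (l.length - 1 - i) := by
  induction l generalizing i with
  | nil => simp at h
  | cons d rest ih =>
    cases i with
    | zero =>
      simp only [List.set_cons_zero, List.getD_cons_zero, H_cons]
      rw [H_acc rest (0 * 3 + v), H_acc rest (0 * 3 + d)]
      simp
      ring
    | succ i =>
      have hi : i < rest.length := Nat.lt_of_succ_lt_succ h
      simp only [List.set_cons_succ, List.getD_cons_succ, H_cons]
      rw [H_acc (rest.set i v) (0 * 3 + d), H_acc rest (0 * 3 + d), ih i hi]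
      simp [List.length_set]
      rw [show rest.length - (i + 1) = rest.length - 1 - i from by omega]
      ring

-- to_int with base 3 is the Horner value
theorem toInt_aux (l : List Int) (b : Int) :
    (List.range l.length).foldl
      (fun result i => result + l.getD i 0 * (3 : Int) ^ (l.length - 1 - i)) b
    = b + H l 0 := by
  induction l generalizing b with
  | nil => simp [H]
  | cons d rest ih =>
    rw [show (d :: rest).length = rest.length + 1 from rfl,
        List.range_succ_eq_map, List.foldl_cons, List.foldl_map]
    have : ∀ (r : Int) (i : Nat),
        r + (d :: rest).getD (i + 1) 0 * (3 : Int) ^ (rest.length + 1 - 1 - (i + 1))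
        = r + rest.getD i 0 * (3 : Int) ^ (rest.length - 1 - i) := by
      intro r i
      rw [List.getD_cons_succ,
          show rest.length + 1 - 1 - (i + 1) = rest.length - 1 - i from by omega]
    simp only [this]
    rw [ih]
    rw [H_cons, H_acc rest (0 * 3 + d)]
    simp
    ring

theorem toInt_eq_H (l : List Int) : to_int l 3 = H l 0 := by
  unfold to_int
  rw [toInt_aux]
  simp

-- A equals the common shape
theorem triple_eq_T (tri : List Int) : triple tri = T tri (H tri 0) := by
  unfold triple T
  have inner : ∀ (acc : List Int) (i : Nat), i < tri.length →
      range3.foldl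
        (fun acc j =>
          if tri.getD i 0 ≠ j then acc ++ [to_int (tri.set i j) 3] else acc)
        acc
      = acc ++ (range3.filter (fun j => tri.getD i 0 ≠ j)).map
          (fun j => H tri 0 + (j - tri.getD i 0) * 3 ^ (tri.length - 1 - i)) := by
    intro acc i hi
    rw [PySem.List.foldl_append_ite (p := fun j => tri.getD i 0 ≠ j)]
    congr 1
    apply List.map_congr_left
    intro j hj
    rw [toInt_eq_H, H_set tri i j hi]
  rw [PySem.List.foldl_congr_mem (g := fun acc i =>
        acc ++ (range3.filter (fun j => tri.getD i 0 ≠ j)).map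
          (fun j => H tri 0 + (j - tri.getD i 0) * 3 ^ (tri.length - 1 - i)))]
  · rw [PySem.List.foldl_append_eq_flatMap]
    simp
  · intro acc i hi
    exact inner acc i (List.mem_range.mp hi)

-- bInner is the filtered map
theorem bInner_eq (base d p : Int) :
    bInner base d p
      = (range3.filter (fun j => d ≠ j)).map
          (fun j => base + (j - d) * p) := by
  unfold bInner
  rw [show range3B = range3 from rfl,
      PySem.List.foldl_append_ite (p := fun j => d ≠ j)]
  simp

-- B's loop equals the common shape when started at the right power
theorem bLoop_eq_T (l : List Int) (base : Int) (hl : l ≠ []) :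
    bLoop l base ((3 : Int) ^ (l.length - 1)) = T l base := by
  induction l with
  | nil => exact absurd rfl hl
  | cons d rest ih =>
    rw [show (d :: rest).length - 1 = rest.length from rfl]
    rw [bLoop, T_cons, bInner_eq]
    congr 1
    cases rest with
    | nil =>
      simp [bLoop, T]
    | cons e rest' =>
      have hp : PySem.Int.floordiv ((3 : Int) ^ (e :: rest').length) 3
          = (3 : Int) ^ ((e :: rest').length - 1) := by
        rw [show (e :: rest').length = ((e :: rest').length - 1) + 1 by simp]
        rw [pow_succ]
        simp [PySem.Int.floordiv]
      rw [hp]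
      exact ih (by simp)

-- ===== VERDICT (by name: the statement is the Claim_ definition above) =====
theorem triple_spec : Claim_equal_triple := by
  intro tri _
  show triple tri = triple_alt tri
  unfold triple_alt
  cases htri : tri with
  | nil => simp [triple, bLoop, to_int]
  | cons d rest =>
    rw [← htri]
    have hne : tri ≠ [] := by rw [htri]; simp
    have hlen : tri.length ≠ 0 := by simp [htri]
    simp only [if_neg hlen]
    rw [triple_eq_T, bLoop_eq_T tri _ hne]
    rfl
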